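-- pv_equiv track=rewrite | github.com/synchronousbuilddigital/BoxFox_price_analyses- | scripts/fetch_pricing.py | ifs_to_nested_if
-- ===== SOURCE A (Python) =====
-- def ifs_to_nested_if(ifs_args_str):
--     """
--     Convert IFS(c1,v1,c2,v2,...) arguments string to nested IF(c1,v1,IF(c2,v2,...,0))
--     ifs_args_str is everything inside IFS(...) — we parse pairs carefully.
--     """
--     # Split by comma but respect nested parentheses
--     parts = []
--     depth = 0
--     current = []
--     for ch in ifs_args_str:
--         if ch == ',' and depth == 0:
--             parts.append(''.join(current).strip())
--             current = []
--         else: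
--             if ch == '(':
--                 depth += 1
--             elif ch == ')':
--                 depth -= 1
--             current.append(ch)
--     if current:
--         parts.append(''.join(current).strip())
--
--     # Build nested IF from pairs
--     if len(parts) < 2:
--         return ifs_args_str
--
--     pairs = [(parts[i], parts[i+1]) for i in range(0, len(parts)-1, 2)]
--     result = '0'
--     for cond, val in reversed(pairs):
--         result = f'IF({cond},{val},{result})'
--     return result
-- ===== SOURCE B (Python) =====
-- def ifs_to_nested_if(ifs_args_str):
--     """
--     Convert IFS(c1,v1,c2,v2,...) arguments string to nested IF(c1,v1,IF(c2,v2,...,0))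
--     ifs_args_str is everything inside IFS(...) — we parse pairs carefully.
--     """
--     def top_comma(s):
--         # index of first comma at parenthesis depth 0, or -1
--         depth = 0
--         for i, ch in enumerate(s):
--             if ch == ',' and depth == 0:
--                 return i
--             if ch == '(':
--                 depth += 1
--             elif ch == ')':
--                 depth -= 1
--         return -1
--
--     def split_top(s):
--         # recursively split on top-level commas; an empty final remainder yields no part
--         i = top_comma(s)
--         if i < 0:
--             return [s.strip()] if s else []
--         return [s[:i].strip()] + split_top(s[i + 1:])
--
--     parts = split_top(ifs_args_str)
--     if len(parts) < 2:
--         return ifs_args_str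
--
--     def build(ps):
--         # nested IF front-to-back; lone trailing part (odd count) is dropped
--         if len(ps) < 2:
--             return '0'
--         return f'IF({ps[0]},{ps[1]},{build(ps[2:])})'
--
--     return build(parts)
-- ===== Notes on version B (the rewrite author's own statement) =====
-- stated objective: alternative
-- what changed: Replaces A's single accumulator state machine (character loop building parts, then a pairs comprehension folded back-to-front over reversed(pairs)) with two direct recursions: split at the first top-level comma and recurse on the remainder, then build the nested IF front-to-back by structural recursion on the parts list.
import Mathlib
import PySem

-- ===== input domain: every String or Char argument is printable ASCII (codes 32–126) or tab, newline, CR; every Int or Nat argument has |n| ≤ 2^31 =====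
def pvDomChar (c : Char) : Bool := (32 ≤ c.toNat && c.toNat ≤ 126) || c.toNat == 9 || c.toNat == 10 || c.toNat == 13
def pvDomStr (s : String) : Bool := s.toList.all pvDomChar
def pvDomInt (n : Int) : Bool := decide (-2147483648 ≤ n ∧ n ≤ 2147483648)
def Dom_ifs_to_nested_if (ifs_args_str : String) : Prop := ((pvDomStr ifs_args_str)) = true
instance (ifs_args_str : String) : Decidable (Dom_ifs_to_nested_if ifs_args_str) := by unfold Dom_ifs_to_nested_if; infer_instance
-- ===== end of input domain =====

-- B replaces A's accumulator state machine (char loop + pairs list + reversed fold) by two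
-- direct recursions: split at the first top-level comma, then build the nested IF front-to-back
-- (objective: alternative decomposition; same cost).

-- ===== PORT A =====
-- one loop step of A's character scan: state = (parts, depth, current)
def pvStepA (st : List (List Char) × Int × List Char) (ch : Char) :
    List (List Char) × Int × List Char :=
  if ch = ',' ∧ st.2.1 = 0 then (st.1 ++ [PySem.Chars.strip st.2.2], st.2.1, [])
  else
    let depth := if ch = '(' then st.2.1 + 1 else if ch = ')' then st.2.1 - 1 else st.2.1
    (st.1, depth, st.2.2 ++ [ch])

-- A's 'pairs = [(parts[i], parts[i+1]) for i in range(0, len(parts)-1, 2)]'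
def pvPairsA (parts : List (List Char)) : List (List Char × List Char) :=
  (PySem.List.pyRange 0 ((parts.length : Int) - 1) 2).map
    (fun i => (PySem.List.pyGetD parts i [], PySem.List.pyGetD parts (i + 1) []))

-- A's 'result = 0; for cond, val in reversed(pairs): result = f"IF({cond},{val},{result})"'
def pvBuildA (parts : List (List Char)) : List Char :=
  (pvPairsA parts).reverse.foldl
    (fun res cv => ['I','F','('] ++ cv.1 ++ [','] ++ cv.2 ++ [','] ++ res ++ [')']) ['0']

def ifs_to_nested_if (ifs_args_str : String) : String :=
  let st := ifs_args_str.toList.foldl pvStepA ([], 0, [])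
  let parts := if st.2.2 ≠ [] then st.1 ++ [PySem.Chars.strip st.2.2] else st.1
  if parts.length < 2 then ifs_args_str
  else String.ofList (pvBuildA parts)

-- ===== PORT B =====
-- index of the first comma at parenthesis depth 0, none if there is no such comma
def pvTopComma : List Char → Int → Option Nat
  | [], _ => none
  | c :: cs, depth =>
    if c = ',' ∧ depth = 0 then some 0
    else
      let depth := if c = '(' then depth + 1 else if c = ')' then depth - 1 else depth
      (pvTopComma cs depth).map (· + 1)

-- (termination fact for pvSplitTop, cited by its decreasing_by)
theorem pvTopComma_lt (s : List Char) (d : Int) (i : Nat) (h : pvTopComma s d = some i) :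
    i < s.length := by
  induction s generalizing d i with
  | nil => simp [pvTopComma] at h
  | cons c cs ih =>
    unfold pvTopComma at h
    split at h
    · simp at h; simp; omega
    · simp only [Option.map_eq_some_iff] at h
      obtain ⟨j, hj, rfl⟩ := h
      have := ih _ _ hj
      simp; omega

-- recursively split on top-level commas; an empty final remainder yields no part
def pvSplitTop (s : List Char) : List (List Char) :=
  match h : pvTopComma s 0 with
  | none => if s = [] then [] else [PySem.Chars.strip s]
  | some i => PySem.Chars.strip (s.take i) :: pvSplitTop (s.drop (i + 1))
termination_by s.length
decreasing_by
  have := pvTopComma_lt s 0 i h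
  simp [List.length_drop]; omega

-- nested IF front-to-back; a lone trailing part (odd count) is dropped
def pvBuild : List (List Char) → List Char
  | c :: v :: rest => ['I','F','('] ++ c ++ [','] ++ v ++ [','] ++ pvBuild rest ++ [')']
  | _ => ['0']

def ifs_to_nested_if_alt (ifs_args_str : String) : String :=
  let parts := pvSplitTop ifs_args_str.toList
  if parts.length < 2 then ifs_args_str
  else String.ofList (pvBuild parts)

-- ===== PRECONDITION & SPEC =====
def Spec_ifs_to_nested_if (ifs_args_str : String) (out : String) : Prop := out = ifs_to_nested_if_alt ifs_args_str
instance (ifs_args_str : String) (out : String) : Decidable (Spec_ifs_to_nested_if ifs_args_str out) := by unfold Spec_ifs_to_nested_if; infer_instance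

-- ===== CLAIM (what is proved, stated in full; the proofs are below) =====
def Claim_equal_ifs_to_nested_if : Prop := ∀ (ifs_args_str : String), Dom_ifs_to_nested_if ifs_args_str → Spec_ifs_to_nested_if ifs_args_str (ifs_to_nested_if ifs_args_str)

-- ===== LEMMAS AND PROOFS =====

-- the parts A's scan produces from state (ps, d, cur) on remaining input s (incl. trailing flush)
def pvPartsA (ps : List (List Char)) (d : Int) (cur : List Char) (s : List Char) :
    List (List Char) :=
  let st := s.foldl pvStepA (ps, d, cur)
  if st.2.2 ≠ [] then st.1 ++ [PySem.Chars.strip st.2.2] else st.1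

theorem pvPartsA_step (s : List Char) : ∀ (ps : List (List Char)) (d : Int) (cur : List Char),
    pvPartsA ps d cur s =
      match pvTopComma s d with
      | some i => pvPartsA (ps ++ [PySem.Chars.strip (cur ++ s.take i)]) 0 [] (s.drop (i + 1))
      | none => if cur ++ s = [] then ps else ps ++ [PySem.Chars.strip (cur ++ s)] := by
  induction s with
  | nil =>
    intro ps d cur
    by_cases h : cur = [] <;> simp [pvPartsA, pvTopComma, h]
  | cons c cs ih =>
    intro ps d cur
    by_cases hc : c = ',' ∧ d = 0
    · obtain ⟨rfl, rfl⟩ := hc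
      have htc : pvTopComma (',' :: cs) 0 = some 0 := by simp [pvTopComma]
      rw [htc]
      have hfold : pvPartsA ps 0 cur (',' :: cs)
          = pvPartsA (ps ++ [PySem.Chars.strip cur]) 0 [] cs := by
        simp [pvPartsA, pvStepA]
      rw [hfold]
      simp
    · have hfold : pvPartsA ps d cur (c :: cs)
          = pvPartsA ps (if c = '(' then d + 1 else if c = ')' then d - 1 else d) (cur ++ [c]) cs := by
        simp [pvPartsA, pvStepA, hc]
      have htc : pvTopComma (c :: cs) d
          = (pvTopComma cs (if c = '(' then d + 1 else if c = ')' then d - 1 else d)).map (· + 1) := by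
        simp [pvTopComma, hc]
      rw [hfold, ih, htc]
      cases hres : pvTopComma cs (if c = '(' then d + 1 else if c = ')' then d - 1 else d) with
      | none => simp
      | some i => simp [List.take_succ_cons, List.drop_succ_cons, List.append_assoc]

theorem pvPartsA_eq_splitTop (n : Nat) : ∀ (s : List Char), s.length ≤ n →
    ∀ (ps : List (List Char)), pvPartsA ps 0 [] s = ps ++ pvSplitTop s := by
  induction n with
  | zero =>
    intro s hs ps
    have hnil : s = [] := by cases s <;> simp_all
    subst hnil
    rw [pvPartsA_step, pvSplitTop]
    simp [pvTopComma]
  | succ n ih =>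
    intro s hs ps
    rw [pvPartsA_step, pvSplitTop]
    cases h : pvTopComma s 0 with
    | none => by_cases hnil : s = [] <;> simp [hnil]
    | some i =>
      have hlt := pvTopComma_lt s 0 i h
      show pvPartsA (ps ++ [PySem.Chars.strip ([] ++ List.take i s)]) 0 [] (List.drop (i + 1) s)
          = ps ++ (PySem.Chars.strip (List.take i s) :: pvSplitTop (List.drop (i + 1) s))
      rw [ih (s.drop (i + 1)) (by simp [List.length_drop]; omega)]
      simp

theorem pvPyRange_two (m : Int) (hm : 0 < m) :
    PySem.List.pyRange 0 m 2
      = List.map (fun k : Nat => (2 : Int) * (k : Int)) (List.range (((m - 1) / 2).toNat + 1)) := by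
  rw [PySem.List.pyRange_of_pos _ _ (by norm_num)]
  have hcount : (if (0:Int) < m then ((m - 0 + 2 - 1) / 2).toNat else 0) = ((m - 1) / 2).toNat + 1 := by
    rw [if_pos hm]
    have h1 : (m - 0 + 2 - 1) = (m - 1) + 1 * 2 := by ring
    rw [h1, Int.add_mul_ediv_right _ _ (by norm_num : (2:Int) ≠ 0)]
    omega
  rw [hcount]
  exact List.map_congr_left (fun k _ => by ring)

-- A's comprehension as a map over Nat indices
theorem pvPairsA_eq (parts : List (List Char)) :
    pvPairsA parts = (List.range (parts.length / 2)).map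
      (fun k => (parts.getD (2 * k) [], parts.getD (2 * k + 1) [])) := by
  unfold pvPairsA
  match parts with
  | [] => simp [PySem.List.pyRange]
  | [a] => simp [PySem.List.pyRange]
  | a :: b :: t =>
    rw [pvPyRange_two _ (by simp only [List.length_cons]; push_cast; omega)]
    rw [List.map_map]
    have hcnt : (((((a :: b :: t).length : Int)) - 1 - 1) / 2).toNat + 1 = (a :: b :: t).length / 2 := by
      simp only [List.length_cons]; push_cast; omega
    rw [hcnt]
    apply List.map_congr_left
    intro k _
    have h1 : (2 : Int) * (k : Int) = ((2 * k : Nat) : Int) := by push_cast; ring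
    have h2 : ((2 * k : Nat) : Int) + 1 = ((2 * k + 1 : Nat) : Int) := by push_cast; ring
    simp only [Function.comp_apply, h1, h2, PySem.List.pyGetD_natCast]

theorem pvPairsA_cons (c v : List Char) (rest : List (List Char)) :
    pvPairsA (c :: v :: rest) = (c, v) :: pvPairsA rest := by
  rw [pvPairsA_eq, pvPairsA_eq]
  have hlen : (c :: v :: rest).length / 2 = rest.length / 2 + 1 := by simp; omega
  rw [hlen, List.range_succ_eq_map]
  simp only [List.map_cons, List.map_map]
  refine congrArg₂ List.cons (by simp) ?_
  apply List.map_congr_left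
  intro k _
  have e1 : 2 * (k + 1) = (2 * k + 1) + 1 := by omega
  simp only [Function.comp_apply, Nat.succ_eq_add_one, e1, List.getD_cons_succ]

theorem pvBuildA_eq_aux (n : Nat) : ∀ (parts : List (List Char)), parts.length ≤ n →
    pvBuildA parts = pvBuild parts := by
  induction n with
  | zero =>
    intro parts h
    have hnil : parts = [] := by cases parts <;> simp_all
    subst hnil
    simp [pvBuildA, pvPairsA, PySem.List.pyRange, pvBuild]
  | succ n ih =>
    intro parts h
    match parts with
    | [] => simp [pvBuildA, pvPairsA, PySem.List.pyRange, pvBuild]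
    | [x] =>
      have : pvPairsA [x] = [] := by
        unfold pvPairsA
        norm_num [PySem.List.pyRange]
      simp [pvBuildA, this, pvBuild]
    | c :: v :: rest =>
      have hrest : rest.length ≤ n := by simp at h; omega
      unfold pvBuildA
      rw [pvPairsA_cons]
      simp only [List.reverse_cons, List.foldl_append, List.foldl_cons, List.foldl_nil]
      rw [show (pvPairsA rest).reverse.foldl
        (fun res cv => ['I','F','('] ++ cv.1 ++ [','] ++ cv.2 ++ [','] ++ res ++ [')']) ['0']
        = pvBuildA rest from rfl]
      rw [ih rest hrest]
      simp [pvBuild]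

theorem pvBuildA_eq (parts : List (List Char)) : pvBuildA parts = pvBuild parts :=
  pvBuildA_eq_aux parts.length parts le_rfl

-- ===== VERDICT (by name: the statement is the Claim_ definition above) =====
theorem ifs_to_nested_if_spec : Claim_equal_ifs_to_nested_if := by
  intro s _
  unfold Spec_ifs_to_nested_if ifs_to_nested_if ifs_to_nested_if_alt
  have hparts := pvPartsA_eq_splitTop s.toList.length s.toList le_rfl []
  simp only [pvPartsA, List.nil_append] at hparts
  simp only [hparts, pvBuildA_eq]
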